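-- pv_equiv track=rewrite | github.com/hminle/intro-neural-nets | assignment1/two_moons/two_moons.py | count_mismatches
-- ===== SOURCE A (Python) =====
-- def count_mismatches(predicted_labels, actual_labels):
--     diffs = { 'false_0': 0, 'false_1': 0 }
--     for i in range(0, len(predicted_labels)):
--         if predicted_labels[i] != actual_labels[i]:
--             if predicted_labels[i] == 0:
--                 diffs['false_0'] += 1
--             elif predicted_labels[i] == 1:
--                 diffs['false_1'] += 1
--     return diffs
-- ===== SOURCE B (Python) =====
-- def count_mismatches(predicted_labels, actual_labels):
--     n = len(predicted_labels)
--     false_0 = sum(1 for i in range(n)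
--                   if predicted_labels[i] != actual_labels[i] and predicted_labels[i] == 0)
--     false_1 = sum(1 for i in range(n)
--                   if predicted_labels[i] != actual_labels[i] and predicted_labels[i] == 1)
--     return {'false_0': false_0, 'false_1': false_1}
-- ===== Notes on version B (the rewrite author's own statement) =====
-- stated objective: simpler
-- what changed: Replaces the single dispatching loop that mutates a dict with two independent generator-sum passes, one per misclassified class, assembling the dict once at the end.
import Mathlib
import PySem

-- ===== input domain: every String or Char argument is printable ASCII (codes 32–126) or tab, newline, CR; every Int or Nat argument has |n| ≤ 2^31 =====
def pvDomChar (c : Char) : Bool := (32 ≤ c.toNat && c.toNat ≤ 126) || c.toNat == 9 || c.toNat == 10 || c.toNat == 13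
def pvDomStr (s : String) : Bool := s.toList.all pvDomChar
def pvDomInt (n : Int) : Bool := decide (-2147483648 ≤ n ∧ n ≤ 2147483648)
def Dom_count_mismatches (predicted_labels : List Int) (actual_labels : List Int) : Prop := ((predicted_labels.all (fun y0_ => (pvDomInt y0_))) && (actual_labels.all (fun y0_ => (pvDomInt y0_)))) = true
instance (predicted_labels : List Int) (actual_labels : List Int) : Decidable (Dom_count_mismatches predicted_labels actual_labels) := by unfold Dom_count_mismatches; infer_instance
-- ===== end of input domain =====

-- B replaces A's single dict-mutating dispatch loop by two independent counting passes, one per class (objective: simpler).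

-- ===== PORT A =====
def count_mismatches (predicted_labels : List Int) (actual_labels : List Int) : List (String × Int) :=
  ((PySem.List.pyRange 0 (predicted_labels.length : Int) 1).foldl (fun d i =>
    if PySem.List.pyGetD predicted_labels i 0 ≠ PySem.List.pyGetD actual_labels i 0 then
      if PySem.List.pyGetD predicted_labels i 0 = 0 then d.modify "false_0" 0 (· + 1)
      else if PySem.List.pyGetD predicted_labels i 0 = 1 then d.modify "false_1" 0 (· + 1)
      else d
    else d) (PySem.Dict.mk [("false_0", 0), ("false_1", 0)])).items

-- ===== PORT B =====
def count_mismatches_alt (predicted_labels : List Int) (actual_labels : List Int) : List (String × Int) :=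
  let n : Int := predicted_labels.length
  let false_0 : Int := ((PySem.List.pyRange 0 n 1).countP (fun i =>
      !(PySem.List.pyGetD predicted_labels i 0 == PySem.List.pyGetD actual_labels i 0) &&
      (PySem.List.pyGetD predicted_labels i 0 == 0)) : Nat)
  let false_1 : Int := ((PySem.List.pyRange 0 n 1).countP (fun i =>
      !(PySem.List.pyGetD predicted_labels i 0 == PySem.List.pyGetD actual_labels i 0) &&
      (PySem.List.pyGetD predicted_labels i 0 == 1)) : Nat)
  [("false_0", false_0), ("false_1", false_1)]

-- ===== PRECONDITION & SPEC =====
-- A raises IndexError when actual_labels is shorter than predicted_labels; Pre_ excludes exactly those inputs.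
def Pre_count_mismatches (predicted_labels : List Int) (actual_labels : List Int) : Prop :=
  predicted_labels.length ≤ actual_labels.length
instance (predicted_labels : List Int) (actual_labels : List Int) : Decidable (Pre_count_mismatches predicted_labels actual_labels) := by unfold Pre_count_mismatches; infer_instance
def pvWitness_count_mismatches : List Int × List Int := ([0, 1, 2], [0, 0, 1])
def Spec_count_mismatches (predicted_labels : List Int) (actual_labels : List Int) (out : List (String × Int)) : Prop := out = count_mismatches_alt predicted_labels actual_labels
instance (predicted_labels : List Int) (actual_labels : List Int) (out : List (String × Int)) : Decidable (Spec_count_mismatches predicted_labels actual_labels out) := by unfold Spec_count_mismatches; infer_instance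

-- ===== CLAIM (what is proved, stated in full; the proofs are below) =====
def Claim_equal_count_mismatches : Prop := ∀ (predicted_labels : List Int) (actual_labels : List Int), Dom_count_mismatches predicted_labels actual_labels → Pre_count_mismatches predicted_labels actual_labels → Spec_count_mismatches predicted_labels actual_labels (count_mismatches predicted_labels actual_labels)

-- ===== LEMMAS AND PROOFS =====

theorem modify_false0 (x y : Int) (f : Int → Int) :
    PySem.Dict.modify (PySem.Dict.mk [("false_0", x), ("false_1", y)]) "false_0" 0 f
      = PySem.Dict.mk [("false_0", f x), ("false_1", y)] := by
  simp [PySem.Dict.modify, PySem.Dict.contains, PySem.Dict.insert, PySem.Dict.getD, PySem.Dict.get?_mk_cons]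

theorem modify_false1 (x y : Int) (f : Int → Int) :
    PySem.Dict.modify (PySem.Dict.mk [("false_0", x), ("false_1", y)]) "false_1" 0 f
      = PySem.Dict.mk [("false_0", x), ("false_1", f y)] := by
  simp [PySem.Dict.modify, PySem.Dict.contains, PySem.Dict.insert, PySem.Dict.getD, PySem.Dict.get?_mk_cons]

theorem loop_eq (p a : List Int) (n : Nat) : ∀ (x y : Int),
    (PySem.List.pyRange 0 (n : Int) 1).foldl (fun d i =>
      if PySem.List.pyGetD p i 0 ≠ PySem.List.pyGetD a i 0 then
        if PySem.List.pyGetD p i 0 = 0 then d.modify "false_0" 0 (· + 1)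
        else if PySem.List.pyGetD p i 0 = 1 then d.modify "false_1" 0 (· + 1)
        else d
      else d) (PySem.Dict.mk [("false_0", x), ("false_1", y)])
    = PySem.Dict.mk
        [("false_0", x + ((PySem.List.pyRange 0 (n : Int) 1).countP (fun i =>
            !(PySem.List.pyGetD p i 0 == PySem.List.pyGetD a i 0) && (PySem.List.pyGetD p i 0 == 0)) : Nat)),
         ("false_1", y + ((PySem.List.pyRange 0 (n : Int) 1).countP (fun i =>
            !(PySem.List.pyGetD p i 0 == PySem.List.pyGetD a i 0) && (PySem.List.pyGetD p i 0 == 1)) : Nat))] := by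
  induction n with
  | zero => intro x y; simp [PySem.List.pyRange_one_eq_nil]
  | succ m ih =>
    intro x y
    have hsplit : PySem.List.pyRange 0 ((m + 1 : Nat) : Int) 1
        = PySem.List.pyRange 0 (m : Int) 1 ++ [(m : Int)] := by
      push_cast
      exact PySem.List.pyRange_one_succ_right (by positivity)
    rw [hsplit, List.foldl_append, List.countP_append, List.countP_append, ih]
    simp only [List.foldl_cons, List.foldl_nil, List.countP_cons, List.countP_nil]
    generalize PySem.List.pyGetD p ((m : Nat) : Int) 0 = gp
    generalize PySem.List.pyGetD a ((m : Nat) : Int) 0 = ga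
    by_cases hne : gp = ga
    · simp [hne]
    · by_cases h0 : gp = 0
      · subst h0
        simp [hne, modify_false0, PySem.Dict.ext_iff, List.cons.injEq, Prod.mk.injEq]
        omega
      · by_cases h1 : gp = 1
        · subst h1
          simp [hne, h0, modify_false1, PySem.Dict.ext_iff, List.cons.injEq, Prod.mk.injEq]
          omega
        · simp [hne, h0, h1]
-- ===== VERDICT (by name: the statement is the Claim_ definition above) =====
theorem count_mismatches_spec : Claim_equal_count_mismatches := by
  intro p a _ _
  unfold Spec_count_mismatches count_mismatches count_mismatches_alt
  rw [loop_eq]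
  simp
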